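-- pv_equiv track=rewrite | github.com/nkaslin/google-foobar | level_4/problem_4_1.py | simplify_graph
-- ===== SOURCE A (Python) =====
-- def simplify_graph(entrances, exits, path):
--     n = len(path)
--     new_n = n - len(exits) - len(entrances) + 2
--     new_path = [[0 for _ in range(new_n)] for _ in range(new_n)]
--     mp = {}
--     cur = 1
--     for i in range(n):
--         if i in entrances:
--             mp[i] = 0
--         elif i in exits:
--             mp[i] = new_n - 1
--         else:
--             mp[i] = cur
--             cur += 1
--     for i, row in enumerate(path):
--         for j in range(len(row)):
--             new_path[mp[i]][mp[j]] += path[i][j]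
--     return new_path
-- ===== SOURCE B (Python) =====
-- def simplify_graph(entrances, exits, path):
--     n = len(path)
--     new_n = n - len(exits) - len(entrances) + 2
--     mp = {}
--     cur = 1
--     for i in range(n):
--         if i in entrances:
--             mp[i] = 0
--         elif i in exits:
--             mp[i] = new_n - 1
--         else:
--             mp[i] = cur
--             cur += 1
--     # phase 1: collapse the columns of each original row into a new_n-wide row
--     inter = []
--     for row in path:
--         acc = [0] * new_n
--         for j, v in enumerate(row):
--             acc[mp[j]] += v
--         inter.append(acc)
--     # phase 2: gather - output row r is the vector sum of the intermediate rows mapped to r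
--     result = []
--     for r in range(new_n):
--         row_r = [0] * new_n
--         for i in range(n):
--             if mp[i] == r:
--                 row_r = [x + y for x, y in zip(row_r, inter[i])]
--         result.append(row_r)
--     return result
-- ===== Notes on version B (the rewrite author's own statement) =====
-- stated objective: alternative
-- what changed: Replaces A's single nested loop that scatters every cell straight into the final matrix by a two-phase reduction: phase 1 collapses each row's columns into an intermediate n x new_n table, phase 2 builds each output row r by vector-summing the intermediate rows whose node maps to r (a gather, never indexing the result by mp[i]).
import Mathlib
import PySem

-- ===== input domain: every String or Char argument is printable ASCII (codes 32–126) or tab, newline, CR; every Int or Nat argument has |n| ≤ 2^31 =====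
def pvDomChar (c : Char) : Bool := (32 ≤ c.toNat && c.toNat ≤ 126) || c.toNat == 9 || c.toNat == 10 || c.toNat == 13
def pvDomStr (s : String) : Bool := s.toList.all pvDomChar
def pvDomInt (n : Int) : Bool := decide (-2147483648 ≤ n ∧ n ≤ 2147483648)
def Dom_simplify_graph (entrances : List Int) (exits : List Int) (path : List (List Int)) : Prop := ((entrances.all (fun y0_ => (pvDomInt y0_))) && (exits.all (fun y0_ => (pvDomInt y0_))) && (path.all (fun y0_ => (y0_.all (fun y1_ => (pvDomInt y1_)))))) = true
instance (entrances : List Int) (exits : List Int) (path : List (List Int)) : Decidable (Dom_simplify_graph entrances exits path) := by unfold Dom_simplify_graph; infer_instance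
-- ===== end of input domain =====

-- B replaces A's single nested scatter loop by a two-phase reduction (collapse columns per row,
-- then gather the intermediate rows into each output row); objective: alternative, same cost.
-- ===== PORT A =====
-- B's Python builds the node->index map mp with the very same loop as A, so both ports
-- share this literal transliteration of that loop.
def pvBuildMp (entrances : List Int) (exits : List Int) (n : Int) (newn : Int) : PySem.Dict Int Int :=
  ((PySem.List.pyRange 0 n 1).foldl (fun (st : PySem.Dict Int Int × Int) i =>
      if i ∈ entrances then (st.1.insert i 0, st.2)
      else if i ∈ exits then (st.1.insert i (newn - 1), st.2)
      else (st.1.insert i st.2, st.2 + 1))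
    (PySem.Dict.empty, 1)).1

-- new_path[r][c] += v  (total: a no-op where Python would raise IndexError; Pre_ keeps indices in range)
def pvAddCell (M : List (List Int)) (r : Int) (c : Int) (v : Int) : List (List Int) :=
  if 0 ≤ r ∧ r < (M.length : Int) then
    M.modify r.toNat (fun row => if 0 ≤ c ∧ c < (row.length : Int) then row.modify c.toNat (· + v) else row)
  else M

def simplify_graph (entrances : List Int) (exits : List Int) (path : List (List Int)) : List (List Int) :=
  let n : Int := (path.length : Int)
  let newn : Int := n - (exits.length : Int) - (entrances.length : Int) + 2
  let newPath : List (List Int) :=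
    (PySem.List.pyRange 0 newn 1).map (fun _ => (PySem.List.pyRange 0 newn 1).map (fun _ => (0 : Int)))
  let mp := pvBuildMp entrances exits n newn
  (PySem.List.enumerate path 0).foldl (fun M p =>
      (PySem.List.pyRange 0 (p.2.length : Int) 1).foldl
        (fun M j => pvAddCell M (mp.getD p.1 0) (mp.getD j 0) (PySem.List.pyGetD p.2 j 0)) M)
    newPath

-- ===== PORT B =====
-- acc[c] += v  (total: a no-op where Python would raise IndexError; Pre_ keeps indices in range)
def pvAddVec (acc : List Int) (c : Int) (v : Int) : List Int :=
  if 0 ≤ c ∧ c < (acc.length : Int) then acc.modify c.toNat (· + v) else acc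

-- phase 1: collapse the columns of one original row into a new_n-wide row
def pvCollapseCols (mp : PySem.Dict Int Int) (newn : Int) (row : List Int) : List Int :=
  (PySem.List.enumerate row 0).foldl (fun acc q => pvAddVec acc (mp.getD q.1 0) q.2)
    (List.replicate newn.toNat 0)

def simplify_graph_alt (entrances : List Int) (exits : List Int) (path : List (List Int)) : List (List Int) :=
  let n : Int := (path.length : Int)
  let newn : Int := n - (exits.length : Int) - (entrances.length : Int) + 2
  let mp := pvBuildMp entrances exits n newn
  let inter := path.map (pvCollapseCols mp newn)
  -- phase 2: gather — output row r is the vector sum of the intermediate rows mapped to r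
  (PySem.List.pyRange 0 newn 1).map (fun r =>
    (PySem.List.pyRange 0 n 1).foldl (fun rowr i =>
        if mp.getD i 0 = r then List.zipWith (· + ·) rowr (PySem.List.pyGetD inter i []) else rowr)
      (List.replicate newn.toNat 0))

-- ===== PRECONDITION & SPEC =====
-- the value A's dict mp assigns to node i, as a closed formula on the input
def pvMpVal (entrances : List Int) (exits : List Int) (newn : Int) (i : Nat) : Int :=
  if (i : Int) ∈ entrances then 0
  else if (i : Int) ∈ exits then newn - 1
  else 1 + ((List.range i).countP (fun k => (k : Int) ∉ entrances ∧ (k : Int) ∉ exits) : Int)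

-- Pre_ admits exactly the inputs on which A returns normally: every row fits in the matrix and
-- every node index A actually touches (row index of a nonempty row, any column index) is mapped
-- into [0, new_n); outside it A raises IndexError/KeyError (B raises on a subset of those inputs).
def Pre_simplify_graph (entrances : List Int) (exits : List Int) (path : List (List Int)) : Prop :=
  (∀ row ∈ path, row.length ≤ path.length) ∧
  (∀ k, k < path.length → path.getD k [] ≠ [] →
    (0 ≤ pvMpVal entrances exits ((path.length : Int) - (exits.length : Int) - (entrances.length : Int) + 2) k ∧
     pvMpVal entrances exits ((path.length : Int) - (exits.length : Int) - (entrances.length : Int) + 2) k <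
       (path.length : Int) - (exits.length : Int) - (entrances.length : Int) + 2) ∧
    (∀ j, j < (path.getD k []).length →
      0 ≤ pvMpVal entrances exits ((path.length : Int) - (exits.length : Int) - (entrances.length : Int) + 2) j ∧
      pvMpVal entrances exits ((path.length : Int) - (exits.length : Int) - (entrances.length : Int) + 2) j <
        (path.length : Int) - (exits.length : Int) - (entrances.length : Int) + 2))

instance (entrances : List Int) (exits : List Int) (path : List (List Int)) :
    Decidable (Pre_simplify_graph entrances exits path) := by
  unfold Pre_simplify_graph; infer_instance

def pvWitness_simplify_graph : List Int × List Int × List (List Int) :=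
  ([0], [2], [[0, 1, 0], [0, 0, 1], [0, 0, 0]])

def Spec_simplify_graph (entrances : List Int) (exits : List Int) (path : List (List Int)) (out : List (List Int)) : Prop := out = simplify_graph_alt entrances exits path
instance (entrances : List Int) (exits : List Int) (path : List (List Int)) (out : List (List Int)) : Decidable (Spec_simplify_graph entrances exits path out) := by unfold Spec_simplify_graph; infer_instance

-- ===== CLAIM (what is proved, stated in full; the proofs are below) =====
def Claim_equal_simplify_graph : Prop := ∀ (entrances : List Int) (exits : List Int) (path : List (List Int)), Dom_simplify_graph entrances exits path → Pre_simplify_graph entrances exits path → Spec_simplify_graph entrances exits path (simplify_graph entrances exits path)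

-- ===== LEMMAS AND PROOFS =====

theorem length_pvAddVec (acc : List Int) (c v : Int) : (pvAddVec acc c v).length = acc.length := by
  unfold pvAddVec; split_ifs <;> simp

theorem pvAddVec_zipWith (a b : List Int) (c v : Int) (h : a.length = b.length) :
    pvAddVec (List.zipWith (· + ·) a b) c v = List.zipWith (· + ·) a (pvAddVec b c v) := by
  have hl : (List.zipWith (· + ·) a b).length = b.length := by simp [h]
  unfold pvAddVec
  rw [hl]
  split_ifs with hc
  · apply List.ext_getElem (by simp [h])
    intro i h1 h2
    simp only [List.getElem_modify, List.getElem_zipWith]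
    split_ifs <;> ring
  · rfl

theorem foldl_pvAddVec_zipWith {α : Type} (g w : α → Int) :
    ∀ (ps : List α) (a b : List Int), a.length = b.length →
    ps.foldl (fun acc q => pvAddVec acc (g q) (w q)) (List.zipWith (· + ·) a b)
      = List.zipWith (· + ·) a (ps.foldl (fun acc q => pvAddVec acc (g q) (w q)) b)
  | [], _, _, _ => rfl
  | q :: ps, a, b, h => by
    simp only [List.foldl_cons]
    rw [pvAddVec_zipWith a b _ _ h]
    exact foldl_pvAddVec_zipWith g w ps a _ (by rw [h, length_pvAddVec])

theorem zipWith_add_replicate_zero (a : List Int) (m : Nat) (h : a.length = m) :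
    List.zipWith (· + ·) a (List.replicate m 0) = a := by
  apply List.ext_getElem (by simp [h])
  intro i h1 h2
  simp [List.getElem_zipWith]

theorem foldl_pvAddVec_from {α : Type} (g w : α → Int) (ps : List α) (a : List Int) (m : Nat)
    (h : a.length = m) :
    ps.foldl (fun acc q => pvAddVec acc (g q) (w q)) a
      = List.zipWith (· + ·) a (ps.foldl (fun acc q => pvAddVec acc (g q) (w q)) (List.replicate m 0)) := by
  conv_lhs => rw [← zipWith_add_replicate_zero a m h]
  exact foldl_pvAddVec_zipWith g w ps a _ (by simp [h])

theorem length_foldl_pvAddVec {α : Type} (g w : α → Int) :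
    ∀ (ps : List α) (a : List Int),
      (ps.foldl (fun acc q => pvAddVec acc (g q) (w q)) a).length = a.length
  | [], _ => rfl
  | q :: ps, a => by
    simp only [List.foldl_cons]
    rw [length_foldl_pvAddVec g w ps, length_pvAddVec]

theorem pvAddCell_eq_set (M : List (List Int)) (r c v : Int) (h : 0 ≤ r ∧ r < (M.length : Int)) :
    pvAddCell M r c v = M.set r.toNat (pvAddVec (M.getD r.toNat []) c v) := by
  have hk : r.toNat < M.length := by omega
  have hg : M.getD r.toNat [] = M[r.toNat] := List.getD_eq_getElem _ _ hk
  unfold pvAddCell pvAddVec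
  rw [if_pos h, hg]
  exact List.modify_eq_set_get _ hk

theorem foldl_pvAddCell {α : Type} (g w : α → Int) (r : Int) :
    ∀ (ps : List α) (M : List (List Int)),
    ps.foldl (fun M q => pvAddCell M r (g q) (w q)) M
      = if 0 ≤ r ∧ r < (M.length : Int) then
          M.set r.toNat (ps.foldl (fun acc q => pvAddVec acc (g q) (w q)) (M.getD r.toNat []))
        else M
  | [], M => by
    split_ifs with h
    · have hk : r.toNat < M.length := by omega
      rw [List.foldl_nil, List.foldl_nil, List.getD_eq_getElem _ _ hk, List.set_getElem_self hk]
    · rfl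
  | q :: ps, M => by
    simp only [List.foldl_cons]
    split_ifs with h
    · have hk : r.toNat < M.length := by omega
      rw [pvAddCell_eq_set M r _ _ h]
      rw [foldl_pvAddCell g w r ps]
      have hl : ((M.set r.toNat (pvAddVec (M.getD r.toNat []) (g q) (w q))).length : Int)
          = (M.length : Int) := by simp
      rw [if_pos (by rw [hl]; exact h)]
      rw [List.set_set]
      congr 1
      rw [List.getD_eq_getElem _ _ (by simpa using hk), List.getElem_set_self]
    · have : pvAddCell M r (g q) (w q) = M := by unfold pvAddCell; exact if_neg h
      rw [this, foldl_pvAddCell g w r ps, if_neg h]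

theorem pvCollapseCols_eq (mp : PySem.Dict Int Int) (newn : Int) (row : List Int) :
    pvCollapseCols mp newn row =
      (PySem.List.pyRange 0 (row.length : Int) 1).foldl
        (fun acc j => pvAddVec acc (mp.getD j 0) (PySem.List.pyGetD row j 0))
        (List.replicate newn.toNat 0) := by
  unfold pvCollapseCols
  rw [PySem.List.enumerate_eq_map_pyRange row (0 : Int), List.foldl_map]
  rfl

theorem length_pvCollapseCols (mp : PySem.Dict Int Int) (newn : Int) (row : List Int) :
    (pvCollapseCols mp newn row).length = newn.toNat := by
  unfold pvCollapseCols
  exact (length_foldl_pvAddVec (fun (q : Int × Int) => mp.getD q.1 0) (fun (q : Int × Int) => q.2) _ _).trans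
    (by simp)

-- pvMergeRow: the canonical per-row form both loop shapes reduce to
def pvMergeRow (M : List (List Int)) (r : Int) (acc : List Int) : List (List Int) :=
  if 0 ≤ r ∧ r < (M.length : Int) then
    M.set r.toNat (List.zipWith (· + ·) (M.getD r.toNat []) acc)
  else M

theorem rowStep_eq (mp : PySem.Dict Int Int) (newn : Int) (r : Int) (row : List Int)
    (M : List (List Int)) (hM : ∀ q ∈ M, q.length = newn.toNat) :
    (PySem.List.pyRange 0 (row.length : Int) 1).foldl
        (fun M j => pvAddCell M r (mp.getD j 0) (PySem.List.pyGetD row j 0)) M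
      = pvMergeRow M r (pvCollapseCols mp newn row) := by
  refine (foldl_pvAddCell (fun j => mp.getD j 0) (fun j => PySem.List.pyGetD row j 0) r _ M).trans ?_
  unfold pvMergeRow
  split_ifs with h
  · have hk : r.toNat < M.length := by omega
    congr 1
    rw [pvCollapseCols_eq]
    have hlen : (M.getD r.toNat []).length = newn.toNat := by
      rw [List.getD_eq_getElem _ _ hk]; exact hM _ (List.getElem_mem hk)
    exact foldl_pvAddVec_from _ _ _ _ _ hlen
  · rfl

theorem length_pvMergeRow (M : List (List Int)) (r : Int) (acc : List Int) :
    (pvMergeRow M r acc).length = M.length := by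
  unfold pvMergeRow; split_ifs <;> simp

theorem uniform_pvMergeRow (M : List (List Int)) (r : Int) (acc : List Int) (L : Nat)
    (hM : ∀ q ∈ M, q.length = L) (ha : acc.length = L) :
    ∀ q ∈ pvMergeRow M r acc, q.length = L := by
  unfold pvMergeRow
  split_ifs with h
  · intro q hq
    rcases List.mem_or_eq_of_mem_set hq with h1 | h1
    · exact hM _ h1
    · have hk : r.toNat < M.length := by omega
      subst h1
      rw [List.length_zipWith, List.getD_eq_getElem _ _ hk, hM _ (List.getElem_mem hk), ha,
        Nat.min_self]
  · exact hM

-- A's combined double loop reduces to one pvMergeRow per original row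
theorem mainFold (mp : PySem.Dict Int Int) (newn : Int) :
    ∀ (rows : List (List Int)) (s : Int) (M : List (List Int)),
      (∀ q ∈ M, q.length = newn.toNat) →
    (PySem.List.enumerate rows s).foldl
        (fun M p => (PySem.List.pyRange 0 (p.2.length : Int) 1).foldl
            (fun M j => pvAddCell M (mp.getD p.1 0) (mp.getD j 0) (PySem.List.pyGetD p.2 j 0)) M) M
      = (PySem.List.enumerate rows s).foldl
          (fun M p => pvMergeRow M (mp.getD p.1 0) (pvCollapseCols mp newn p.2)) M
  | [], _, _, _ => rfl
  | row :: rows, s, M, hM => by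
    rw [PySem.List.enumerate_cons]
    simp only [List.foldl_cons]
    rw [rowStep_eq mp newn _ row M hM]
    exact mainFold mp newn rows (s + 1) _
      (uniform_pvMergeRow _ _ _ _ hM (length_pvCollapseCols mp newn row))

theorem length_foldl_pvMergeRow {α : Type} (g : α → Int) (c : α → List Int) :
    ∀ (ps : List α) (Z : List (List Int)),
      (ps.foldl (fun M p => pvMergeRow M (g p) (c p)) Z).length = Z.length
  | [], _ => rfl
  | p :: ps, Z => by
    simp only [List.foldl_cons]
    rw [length_foldl_pvMergeRow g c ps, length_pvMergeRow]

-- getElem? view of one merge step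
theorem getElem?_pvMergeRow (Z : List (List Int)) (r : Int) (acc : List Int) (k : Nat) :
    (pvMergeRow Z r acc)[k]? =
      if r = (k : Int) then (Z[k]?).map (fun z => List.zipWith (· + ·) z acc) else Z[k]? := by
  unfold pvMergeRow
  split_ifs with h hrk hrk
  · -- in range, r = k
    have hk : k < Z.length := by omega
    have : r.toNat = k := by omega
    rw [← this] at hk ⊢
    rw [List.getElem?_set_self hk, List.getElem?_eq_getElem hk, Option.map_some,
      List.getD_eq_getElem _ _ hk]
  · -- in range, r ≠ k
    exact List.getElem?_set_ne (by omega)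
  · -- out of range, r = k : then k ≥ Z.length, both sides none
    have hk : ¬ k < Z.length := by omega
    rw [List.getElem?_eq_none (by omega)]
    rfl
  · rfl

-- row k of the scatter fold is a conditional fold over the same items
theorem foldl_pvMergeRow_getElem? {α : Type} (g : α → Int) (c : α → List Int) :
    ∀ (ps : List α) (Z : List (List Int)) (k : Nat),
    (ps.foldl (fun M p => pvMergeRow M (g p) (c p)) Z)[k]?
      = (Z[k]?).map (fun z =>
          ps.foldl (fun acc p => if g p = (k : Int) then List.zipWith (· + ·) acc (c p) else acc) z)
  | [], Z, k => by cases h : Z[k]? <;> simp [h]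
  | p :: ps, Z, k => by
    simp only [List.foldl_cons]
    rw [foldl_pvMergeRow_getElem? g c ps _ k, getElem?_pvMergeRow]
    by_cases hgk : g p = (k : Int)
    · rw [if_pos hgk]
      cases Z[k]? <;> simp [hgk]
    · rw [if_neg hgk]
      cases Z[k]? <;> simp [hgk]

theorem pv_assemble (mp : PySem.Dict Int Int) (newn : Int) (path : List (List Int)) :
    (PySem.List.enumerate path 0).foldl
        (fun M p => (PySem.List.pyRange 0 (p.2.length : Int) 1).foldl
            (fun M j => pvAddCell M (mp.getD p.1 0) (mp.getD j 0) (PySem.List.pyGetD p.2 j 0)) M)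
        (List.replicate newn.toNat (List.replicate newn.toNat 0))
      = (PySem.List.pyRange 0 newn 1).map (fun r =>
          (PySem.List.pyRange 0 (path.length : Int) 1).foldl (fun rowr i =>
              if mp.getD i 0 = r then
                List.zipWith (· + ·) rowr (PySem.List.pyGetD (path.map (pvCollapseCols mp newn)) i [])
              else rowr)
            (List.replicate newn.toNat 0)) := by
  rw [mainFold mp newn path 0 _ (fun q hq => by rw [List.eq_of_mem_replicate hq, List.length_replicate])]
  apply List.ext_getElem?
  intro k
  rw [foldl_pvMergeRow_getElem? (fun p => mp.getD p.1 0) (fun p => pvCollapseCols mp newn p.2)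
      (PySem.List.enumerate path 0), List.getElem?_map, List.getElem?_replicate]
  by_cases hkL : k < newn.toNat
  · have hkR : k < (PySem.List.pyRange 0 newn 1).length := by
      simp [PySem.List.length_pyRange_one, hkL]
    rw [if_pos hkL, List.getElem?_eq_getElem hkR, PySem.List.getElem_pyRange_one _ _ _ hkR, zero_add]
    rw [Option.map_some]
    congr 1
    rw [PySem.List.enumerate_eq_map_pyRange path ([] : List Int), List.foldl_map]
    refine PySem.List.foldl_congr_mem _ _ _ _ ?_
    intro acc x hx
    have hxb : 0 ≤ x ∧ x < (path.length : Int) := by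
      simpa using (PySem.List.mem_pyRange_one).1 hx
    simp only []
    congr 1
    rw [PySem.List.pyGetD_eq_getElem _ _ hxb.1 (by exact_mod_cast hxb.2),
        PySem.List.pyGetD_eq_getElem _ _ hxb.1 (by simpa using hxb.2),
        List.getElem_map]
  · rw [if_neg hkL, List.getElem?_eq_none (by simpa [PySem.List.length_pyRange_one] using hkL)]
    rfl

theorem pv_equiv (entrances : List Int) (exits : List Int) (path : List (List Int)) :
    simplify_graph entrances exits path = simplify_graph_alt entrances exits path := by
  simp only [simplify_graph, simplify_graph_alt]
  simp only [List.map_const', PySem.List.length_pyRange_one, sub_zero]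
  exact pv_assemble _ _ path

-- ===== VERDICT (by name: the statement is the Claim_ definition above) =====
theorem simplify_graph_spec : Claim_equal_simplify_graph := by
  intro entrances exits path _ _
  unfold Spec_simplify_graph
  exact pv_equiv entrances exits path
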